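-- pv_equiv track=rewrite | github.com/HaloOrangeWang/NoiseMaker | MakerSrc/interfaces/utils.py | min_number_except_1
-- ===== SOURCE A (Python) =====
-- def min_number_except_1(array):
--     """
--     找出一个数组中不是-1的最小数
--     :param array: 数组
--     :return: 这个最小数及其在数组中的位置（如果这个数组全部是-1则返回-1,len(array)）
--     """
--     min_number = max(array)
--     min_at = len(array)
--     for (i, t) in enumerate(array):
--         if t != -1 and t <= min_number:
--             min_number = t
--             min_at = i
--     return min_number, min_at
-- ===== SOURCE B (Python) =====
-- def min_number_except_1(array):
--     """
--     找出一个数组中不是-1的最小数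
--     :param array: 数组
--     :return: 这个最小数及其在数组中的位置（如果这个数组全部是-1则返回-1,len(array)）
--     """
--     min_number = max(array)
--     non_neg = [t for t in array if t != -1]
--     if non_neg:
--         min_number = min(non_neg)
--         min_at = max(i for i, t in enumerate(array) if t == min_number)
--     else:
--         min_at = len(array)
--     return min_number, min_at
-- ===== Notes on version B (the rewrite author's own statement) =====
-- stated objective: idiomatic
-- what changed: Replaces the fused single-scan threshold-tracking loop by aggregate builtins: filter out the -1s, take min of the filtered list, then recover the last index of that minimum with max over enumerate; the all-(-1) case keeps max(array) and len(array).
import Mathlib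
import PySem

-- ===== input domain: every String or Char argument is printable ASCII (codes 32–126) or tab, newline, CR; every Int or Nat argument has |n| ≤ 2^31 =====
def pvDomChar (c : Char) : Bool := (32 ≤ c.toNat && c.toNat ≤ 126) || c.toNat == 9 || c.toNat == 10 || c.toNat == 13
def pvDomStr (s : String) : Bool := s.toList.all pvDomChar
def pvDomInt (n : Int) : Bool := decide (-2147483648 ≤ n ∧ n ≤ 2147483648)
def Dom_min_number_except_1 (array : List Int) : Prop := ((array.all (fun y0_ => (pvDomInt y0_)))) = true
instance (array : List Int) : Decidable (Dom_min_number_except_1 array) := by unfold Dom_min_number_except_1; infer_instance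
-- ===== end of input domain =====

-- B replaces A's fused threshold-tracking scan by aggregate steps (filter out the -1s, min, then max of the matching indices); same values, no speed claim.

-- ===== PORT A =====
def min_number_except_1 (array : List Int) : Int × Int :=
  match PySem.List.max? array (fun x => x) with
  | none => (0, 0)  -- Python raises ValueError on max([]) here; excluded by Pre_
  | some m0 =>
    (PySem.List.enumerate array 0).foldl
      (fun s it => if it.2 ≠ -1 ∧ it.2 ≤ s.1 then (it.2, it.1) else s)
      (m0, (array.length : Int))

-- ===== PORT B =====
def min_number_except_1_alt (array : List Int) : Int × Int :=
  match PySem.List.max? array (fun x => x) with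
  | none => (0, 0)  -- Python raises ValueError on max([]) here; excluded by Pre_
  | some m0 =>
    match PySem.List.min? (array.filter (fun t => t ≠ -1)) (fun x => x) with
    | none => (m0, (array.length : Int))
    | some m =>
      (m, (PySem.List.max?
            (((PySem.List.enumerate array 0).filter (fun it => it.2 = m)).map (fun it => it.1))
            (fun x => x)).getD 0)

-- ===== PRECONDITION & SPEC =====
-- Pre_ excludes only the empty list, on which Python's max(array) raises ValueError (in both A and B).
def Pre_min_number_except_1 (array : List Int) : Prop := array ≠ []
instance (array : List Int) : Decidable (Pre_min_number_except_1 array) := by unfold Pre_min_number_except_1; infer_instance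
def pvWitness_min_number_except_1 : List Int := [3, -1, 2, 2]

def Spec_min_number_except_1 (array : List Int) (out : Int × Int) : Prop := out = min_number_except_1_alt array
instance (array : List Int) (out : Int × Int) : Decidable (Spec_min_number_except_1 array out) := by unfold Spec_min_number_except_1; infer_instance

-- ===== CLAIM (what is proved, stated in full; the proofs are below) =====
def Claim_equal_min_number_except_1 : Prop := ∀ (array : List Int), Dom_min_number_except_1 array → Pre_min_number_except_1 array → Spec_min_number_except_1 array (min_number_except_1 array)

-- ===== LEMMAS AND PROOFS =====

-- last k-based index of v in the list (meaningful when v occurs in it)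
def lastIdx (v : Int) (k : Int) : List Int → Int
  | [] => k
  | _ :: xs => if v ∈ xs then lastIdx v (k + 1) xs else k

theorem enum_fst_ge (xs : List Int) (j : Int) :
    ∀ it ∈ PySem.List.enumerate xs j, j ≤ it.1 := by
  induction xs generalizing j with
  | nil => simp [PySem.List.enumerate_nil]
  | cons x xs ih =>
    intro it hit
    rw [PySem.List.enumerate_cons] at hit
    rcases List.mem_cons.mp hit with h | h
    · simp [h]
    · have := ih (j + 1) it h; omega

theorem enum_snd_mem (xs : List Int) (j : Int) :
    ∀ it ∈ PySem.List.enumerate xs j, it.2 ∈ xs := by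
  intro it hit
  have : it.2 ∈ (PySem.List.enumerate xs j).map (fun p => p.2) :=
    List.mem_map_of_mem hit
  rwa [PySem.List.map_snd_enumerate] at this

theorem mem_enum_snd (xs : List Int) (j : Int) {v : Int} (hv : v ∈ xs) :
    ∃ it ∈ PySem.List.enumerate xs j, it.2 = v := by
  have : v ∈ (PySem.List.enumerate xs j).map (fun p => p.2) := by
    rwa [PySem.List.map_snd_enumerate]
  rcases List.mem_map.mp this with ⟨it, hit, h2⟩
  exact ⟨it, hit, h2⟩

theorem foldl_min_pull (l : List Int) : ∀ a b : Int,
    List.foldl min (min a b) l = min a (List.foldl min b l) := by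
  induction l with
  | nil => intro a b; rfl
  | cons y l ih =>
    intro a b
    simp only [List.foldl]
    rw [min_assoc, ih]

-- the max of the indices of the occurrences of v is its last index
theorem max_filter_idx (v : Int) (xs : List Int) (hv : v ∈ xs) : ∀ (k : Int),
    PySem.List.max?
      (((PySem.List.enumerate xs k).filter (fun it => it.2 = v)).map (fun it => it.1))
      (fun x => x) = some (lastIdx v k xs) := by
  induction xs with
  | nil => cases hv
  | cons x xs ih =>
    intro k
    rw [PySem.List.enumerate_cons, List.filter_cons]
    by_cases hxv : x = v
    · rw [if_pos (by simp [hxv] : decide ((k, x).2 = v) = true), List.map_cons]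
      show PySem.List.max?
          (k :: ((PySem.List.enumerate xs (k + 1)).filter (fun it => it.2 = v)).map (fun it => it.1))
          (fun x => x) = some (lastIdx v k (x :: xs))
      by_cases hmem : v ∈ xs
      · have hi := ih hmem (k + 1)
        cases hcr : ((PySem.List.enumerate xs (k + 1)).filter (fun it => it.2 = v)).map (fun it => it.1) with
        | nil =>
          exfalso
          rcases mem_enum_snd xs (k + 1) hmem with ⟨it, hit, h2⟩
          have hitf : it ∈ (PySem.List.enumerate xs (k + 1)).filter (fun it => it.2 = v) :=
            List.mem_filter.mpr ⟨hit, by simp [h2]⟩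
          have h1 : it.1 ∈ ((PySem.List.enumerate xs (k + 1)).filter (fun it => it.2 = v)).map (fun it => it.1) :=
            List.mem_map_of_mem hitf
          rw [hcr] at h1
          simp at h1
        | cons c rest =>
          rw [hcr] at hi
          rw [PySem.List.max?_id_cons] at hi ⊢
          have hc : c ∈ ((PySem.List.enumerate xs (k + 1)).filter (fun it => it.2 = v)).map (fun it => it.1) := by
            rw [hcr]; exact List.mem_cons_self ..
          rcases List.mem_map.mp hc with ⟨it, hit, hfst⟩
          have hge := enum_fst_ge xs (k + 1) it (List.mem_of_mem_filter hit)
          have hkc : k ≤ c := by omega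
          rw [show List.foldl max k (c :: rest) = List.foldl max c rest from by
            rw [List.foldl_cons, max_eq_right hkc]]
          rw [show lastIdx v k (x :: xs) = lastIdx v (k + 1) xs from by simp [lastIdx, hmem]]
          exact hi
      · have hnil : (PySem.List.enumerate xs (k + 1)).filter (fun it => it.2 = v) = [] := by
          cases hq : (PySem.List.enumerate xs (k + 1)).filter (fun it => it.2 = v) with
          | nil => rfl
          | cons c cs =>
            exfalso
            have hcmem : c ∈ (PySem.List.enumerate xs (k + 1)).filter (fun it => it.2 = v) := by
              rw [hq]; exact List.mem_cons_self ..
            have hc := List.mem_filter.mp hcmem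
            exact hmem ((by simpa using hc.2 : c.2 = v) ▸ enum_snd_mem xs (k + 1) c hc.1)
        rw [hnil, List.map_nil, PySem.List.max?_id_cons]
        simp only [List.foldl_nil]
        rw [show lastIdx v k (x :: xs) = k from by simp [lastIdx, hmem]]
    · rw [if_neg (by simp [hxv] : ¬ decide ((k, x).2 = v) = true)]
      have hmem : v ∈ xs := by
        rcases List.mem_cons.mp hv with h | h
        · exact absurd h.symm hxv
        · exact h
      rw [show lastIdx v k (x :: xs) = lastIdx v (k + 1) xs from by simp [lastIdx, hmem]]
      exact ih hmem (k + 1)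

-- characterisation of A's fold: result is the min of the non-(-1) elements when that min
-- is below the threshold, paired with its last index
theorem fold_char (xs : List Int) : ∀ (m j k : Int),
    (PySem.List.enumerate xs k).foldl
      (fun s it => if it.2 ≠ -1 ∧ it.2 ≤ s.1 then (it.2, it.1) else s) (m, j) =
    (match PySem.List.min? (xs.filter (fun t => t ≠ -1)) (fun x => x) with
     | none => (m, j)
     | some tm => if tm ≤ m then (tm, lastIdx tm k xs) else (m, j)) := by
  induction xs with
  | nil => intro m j k; rfl
  | cons x xs ih =>
    intro m j k
    rw [PySem.List.enumerate_cons, List.foldl_cons]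
    show List.foldl (fun s it => if it.2 ≠ -1 ∧ it.2 ≤ s.1 then (it.2, it.1) else s)
        (if x ≠ -1 ∧ x ≤ m then (x, k) else (m, j)) (PySem.List.enumerate xs (k + 1)) = _
    by_cases hx : x = -1
    · rw [if_neg (by simp [hx]), ih]
      rw [show (x :: xs).filter (fun t => t ≠ -1) = xs.filter (fun t => t ≠ -1) from by
        rw [List.filter_cons]; simp [hx]]
      cases htm : PySem.List.min? (xs.filter (fun t => t ≠ -1)) (fun x => x) with
      | none => rfl
      | some tm =>
        simp only []
        have htmem : tm ∈ xs := List.mem_of_mem_filter (PySem.List.min?_mem htm)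
        rw [show lastIdx tm k (x :: xs) = lastIdx tm (k + 1) xs from by simp [lastIdx, htmem]]
    · rw [show (x :: xs).filter (fun t => t ≠ -1) = x :: xs.filter (fun t => t ≠ -1) from by
        rw [List.filter_cons]; simp [hx]]
      cases hF : xs.filter (fun t => t ≠ -1) with
      | nil =>
        have hxn : x ∉ xs := by
          intro hmemx
          have hxf : x ∈ xs.filter (fun t => t ≠ -1) := List.mem_filter.mpr ⟨hmemx, by simp [hx]⟩
          rw [hF] at hxf
          simp at hxf
        rw [PySem.List.min?_id_cons]
        simp only [List.foldl_nil]
        by_cases hxm : x ≤ m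
        · rw [if_pos (⟨hx, hxm⟩ : x ≠ -1 ∧ x ≤ m), ih, hF, if_pos hxm]
          rw [show lastIdx x k (x :: xs) = k from by simp [lastIdx, hxn]]
          rfl
        · rw [if_neg (fun h => hxm h.2), ih, hF, if_neg hxm]
          rfl
      | cons c rest =>
        have htm : PySem.List.min? (c :: rest) (fun y => y) = some (List.foldl min c rest) :=
          PySem.List.min?_id_cons c rest
        have htmemF : List.foldl min c rest ∈ xs.filter (fun t => t ≠ -1) := by
          rw [hF]; exact PySem.List.min?_mem htm
        have htmem : List.foldl min c rest ∈ xs := List.mem_of_mem_filter htmemF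
        have htmin : ∀ y ∈ c :: rest, List.foldl min c rest ≤ y := by
          intro y hy
          simpa using PySem.List.min?_isMin htm y hy
        have hid : PySem.List.min? (x :: c :: rest) (fun y => y) = some (min x (List.foldl min c rest)) := by
          rw [PySem.List.min?_id_cons]
          rw [show List.foldl min x (c :: rest) = min x (List.foldl min c rest) from by
            rw [List.foldl_cons, foldl_min_pull]]
        rw [hid]
        simp only []
        have hlast : lastIdx (List.foldl min c rest) k (x :: xs) = lastIdx (List.foldl min c rest) (k + 1) xs := by
          simp [lastIdx, htmem]
        by_cases hxm : x ≤ m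
        · rw [if_pos (⟨hx, hxm⟩ : x ≠ -1 ∧ x ≤ m), ih, hF, htm]
          simp only []
          by_cases h1 : List.foldl min c rest ≤ x
          · rw [if_pos h1, min_eq_right h1, if_pos (le_trans h1 hxm), hlast]
          · have hxn : x ∉ xs := by
              intro hmemx
              have hxf : x ∈ xs.filter (fun t => t ≠ -1) := List.mem_filter.mpr ⟨hmemx, by simp [hx]⟩
              rw [hF] at hxf
              exact h1 (htmin x hxf)
            rw [if_neg h1, min_eq_left (not_le.mp h1).le, if_pos hxm]
            rw [show lastIdx x k (x :: xs) = k from by simp [lastIdx, hxn]]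
        · rw [if_neg (fun h => hxm h.2), ih, hF, htm]
          simp only []
          by_cases h2 : List.foldl min c rest ≤ m
          · rw [min_eq_right (by omega : List.foldl min c rest ≤ x)]
            rw [if_pos h2, if_pos h2, hlast]
          · rw [if_neg h2, if_neg (fun h => Or.elim (min_le_iff.mp h) hxm h2)]

-- ===== VERDICT (by name: the statement is the Claim_ definition above) =====
theorem min_number_except_1_spec : Claim_equal_min_number_except_1 := by
  intro array _ hpre
  unfold Spec_min_number_except_1 min_number_except_1 min_number_except_1_alt
  cases hmax : PySem.List.max? array (fun x => x) with
  | none =>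
    exfalso
    cases array with
    | nil => exact hpre rfl
    | cons a as =>
      rw [PySem.List.max?_id_cons] at hmax
      simp at hmax
  | some m0 =>
    simp only []
    rw [fold_char]
    cases htm : PySem.List.min? (array.filter (fun t => t ≠ -1)) (fun x => x) with
    | none => rfl
    | some tm =>
      simp only []
      have htmem : tm ∈ array := List.mem_of_mem_filter (PySem.List.min?_mem htm)
      have hle : tm ≤ m0 := by simpa using PySem.List.max?_isMax hmax tm htmem
      rw [if_pos hle, max_filter_idx tm array htmem 0]
      rfl
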